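-- pv_equiv track=rewrite | github.com/sbknana/project-pombal | equipa/bash_security.py | _extract_unquoted_keep_delimiters
-- ===== SOURCE A (Python) =====
-- def _extract_unquoted_keep_delimiters(command: str) -> str:
--     """Strip quoted *content* but preserve quote delimiter characters.
--
--     Like ``_extract_unquoted`` but keeps ``'`` and ``"`` in the output.
--     This is needed by ``_check_mid_word_hash`` to detect quote-adjacent
--     ``#`` patterns like ``'x'#`` where full stripping would hide the
--     adjacency.
--     """
--     result: list[str] = []
--     in_single = False
--     in_double = False
--     escaped = False
--
--     for ch in command:
--         if escaped:
--             escaped = False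
--             if not in_single and not in_double:
--                 result.append(ch)
--             continue
--
--         if ch == "\\" and not in_single:
--             escaped = True
--             if not in_single and not in_double:
--                 result.append(ch)
--             continue
--
--         if ch == "'" and not in_double:
--             in_single = not in_single
--             result.append(ch)  # Keep the delimiter
--             continue
--
--         if ch == '"' and not in_single:
--             in_double = not in_double
--             result.append(ch)  # Keep the delimiter
--             continue
--
--         if not in_single and not in_double:
--             result.append(ch)
--
--     return "".join(result)
-- ===== SOURCE B (Python) =====
-- def _extract_unquoted_keep_delimiters(command: str) -> str:
--     """Strip quoted content but keep the quote delimiters, by skipping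
--     whole quoted regions in one inner scan instead of a per-char state
--     machine."""
--     out = []
--     i, n = 0, len(command)
--     while i < n:
--         ch = command[i]
--         if ch == "'":
--             out.append("'")
--             j = command.find("'", i + 1)
--             if j == -1:
--                 break  # unterminated: the rest is quoted content, dropped
--             out.append("'")
--             i = j + 1
--         elif ch == '"':
--             out.append('"')
--             j = i + 1
--             while j < n:
--                 if command[j] == '\\':
--                     j += 2
--                 elif command[j] == '"':
--                     break
--                 else:
--                     j += 1
--             if j >= n:
--                 break  # unterminated double-quoted region
--             out.append('"')
--             i = j + 1
--         elif ch == '\\':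
--             out.append(ch)
--             if i + 1 < n:
--                 out.append(command[i + 1])
--             i += 2
--         else:
--             out.append(ch)
--             i += 1
--     return "".join(out)
-- ===== Notes on version B (the rewrite author's own statement) =====
-- stated objective: alternative
-- what changed: Replaced A's per-character state machine with escaped/in_single/in_double flags by an index-based loop that skips each quoted region with one inner scan (str.find for single quotes, a backslash-aware scan for double quotes) and handles escapes by inline lookahead.
import Mathlib
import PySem

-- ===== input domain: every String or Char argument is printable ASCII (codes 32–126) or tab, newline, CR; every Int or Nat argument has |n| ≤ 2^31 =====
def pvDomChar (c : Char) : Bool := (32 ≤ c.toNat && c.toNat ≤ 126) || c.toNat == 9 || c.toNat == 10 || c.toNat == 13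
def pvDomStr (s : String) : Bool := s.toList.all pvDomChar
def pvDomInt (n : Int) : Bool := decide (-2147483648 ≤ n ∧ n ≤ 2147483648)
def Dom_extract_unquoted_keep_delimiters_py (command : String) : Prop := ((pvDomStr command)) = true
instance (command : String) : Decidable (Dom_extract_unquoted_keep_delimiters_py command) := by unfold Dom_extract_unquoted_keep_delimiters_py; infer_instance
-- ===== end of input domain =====

-- B replaces A's per-character escaped/in_single/in_double state machine by an index
-- loop that skips each quoted region with one inner scan (objective: alternative).

-- ===== PORT A =====
-- A's for-loop over the characters with state (result, in_single, in_double, escaped)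
def pvGoA : List Char → List Char → Bool → Bool → Bool → List Char
  | [], res, _, _, _ => res
  | ch :: rest, res, is_, id_, esc =>
    if esc then
      pvGoA rest (if !is_ && !id_ then res ++ [ch] else res) is_ id_ false
    else if ch == '\\' && !is_ then
      pvGoA rest (if !is_ && !id_ then res ++ [ch] else res) is_ id_ true
    else if ch == '\'' && !id_ then
      pvGoA rest (res ++ [ch]) (!is_) id_ false
    else if ch == '"' && !is_ then
      pvGoA rest (res ++ [ch]) is_ (!id_) false
    else
      pvGoA rest (if !is_ && !id_ then res ++ [ch] else res) is_ id_ false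

def extract_unquoted_keep_delimiters_py (command : String) : String :=
  String.ofList (pvGoA command.toList [] false false false)

-- ===== PORT B =====
-- command.find("'", i+1): drop the single-quoted content, return the tail after the
-- closing quote (none = unterminated)
def pvSkipSingle : List Char → Option (List Char)
  | [] => none
  | c :: rest => if c == '\'' then some rest else pvSkipSingle rest

-- B's inner scan over a double-quoted region (a backslash consumes the next char)
def pvSkipDouble : List Char → Option (List Char)
  | [] => none
  | c :: rest =>
    if c == '\\' then
      match rest with
      | [] => none
      | _ :: rest' => pvSkipDouble rest'
    else if c == '"' then some rest
    else pvSkipDouble rest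

-- termination facts for pvGoB (cited by its decreasing_by)
theorem pvSkipSingle_length : ∀ (l rest : List Char), pvSkipSingle l = some rest → rest.length ≤ l.length := by
  intro l
  induction l with
  | nil => intro rest h; simp [pvSkipSingle] at h
  | cons c t ih =>
    intro rest h
    simp only [pvSkipSingle] at h
    split at h
    · cases h; simp
    · have := ih rest h; simp; omega

theorem pvSkipDouble_length : ∀ (l rest : List Char), pvSkipDouble l = some rest → rest.length ≤ l.length := by
  intro l
  induction l using pvSkipDouble.induct with
  | case1 => intro r h; simp [pvSkipDouble] at h
  | case2 c hA => intro r h; rw [pvSkipDouble.eq_def] at h; dsimp only at h; simp [hA] at h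
  | case3 c hA c' rest ih =>
    intro r h
    rw [pvSkipDouble.eq_def] at h; dsimp only at h
    simp [hA] at h
    have := ih r h; simp; omega
  | case4 c rest hA hB =>
    intro r h
    rw [pvSkipDouble.eq_def] at h; dsimp only at h
    simp [hA, hB] at h
    subst h; simp
  | case5 c rest hA hB ih =>
    intro r h
    rw [pvSkipDouble.eq_def] at h; dsimp only at h
    simp [hA, hB] at h
    have := ih r h; simp; omega

-- B's while-loop over the remaining characters
def pvGoB : List Char → List Char
  | [] => []
  | ch :: rest =>
    if h1 : ch = '\'' then
      match h : pvSkipSingle rest with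
      | none => ['\'']
      | some rest' => '\'' :: '\'' :: pvGoB rest'
    else if h2 : ch = '"' then
      match h : pvSkipDouble rest with
      | none => ['"']
      | some rest' => '"' :: '"' :: pvGoB rest'
    else if ch = '\\' then
      match rest with
      | [] => [ch]
      | c2 :: rest' => ch :: c2 :: pvGoB rest'
    else
      ch :: pvGoB rest
termination_by l => l.length
decreasing_by
  · have := pvSkipSingle_length rest rest' h; simp; omega
  · have := pvSkipDouble_length rest rest' h; simp; omega
  · simp
  · simp

def extract_unquoted_keep_delimiters_py_alt (command : String) : String :=
  String.ofList (pvGoB command.toList)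

-- ===== PRECONDITION & SPEC =====
def Spec_extract_unquoted_keep_delimiters_py (command : String) (out : String) : Prop := out = extract_unquoted_keep_delimiters_py_alt command
instance (command : String) (out : String) : Decidable (Spec_extract_unquoted_keep_delimiters_py command out) := by unfold Spec_extract_unquoted_keep_delimiters_py; infer_instance

-- ===== CLAIM (what is proved, stated in full; the proofs are below) =====
def Claim_equal_extract_unquoted_keep_delimiters_py : Prop := ∀ (command : String), Dom_extract_unquoted_keep_delimiters_py command → Spec_extract_unquoted_keep_delimiters_py command (extract_unquoted_keep_delimiters_py command)

-- ===== LEMMAS AND PROOFS =====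

-- unfolding lemmas for the well-founded pvGoB and for pvSkipDouble on a cons
theorem pvGoB_nil : pvGoB [] = [] := by rw [pvGoB.eq_def]

theorem pvGoB_sq_none (rest : List Char) (h : pvSkipSingle rest = none) :
    pvGoB ('\'' :: rest) = ['\''] := by
  rw [pvGoB.eq_def]; dsimp only; (repeat' split) <;> simp_all

theorem pvGoB_sq_some (rest rest' : List Char) (h : pvSkipSingle rest = some rest') :
    pvGoB ('\'' :: rest) = '\'' :: '\'' :: pvGoB rest' := by
  rw [pvGoB.eq_def]; dsimp only; (repeat' split) <;> simp_all

theorem pvGoB_dq_none (rest : List Char) (h : pvSkipDouble rest = none) :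
    pvGoB ('"' :: rest) = ['"'] := by
  rw [pvGoB.eq_def]; dsimp only; (repeat' split) <;> simp_all

theorem pvGoB_dq_some (rest rest' : List Char) (h : pvSkipDouble rest = some rest') :
    pvGoB ('"' :: rest) = '"' :: '"' :: pvGoB rest' := by
  rw [pvGoB.eq_def]; dsimp only; (repeat' split) <;> simp_all

theorem pvGoB_bs_nil : pvGoB ['\\'] = ['\\'] := by
  rw [pvGoB.eq_def]; dsimp only; (repeat' split) <;> simp_all

theorem pvGoB_bs_cons (c : Char) (rest : List Char) :
    pvGoB ('\\' :: c :: rest) = '\\' :: c :: pvGoB rest := by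
  rw [pvGoB.eq_def]; dsimp only; (repeat' split) <;> simp_all

theorem pvGoB_other (c : Char) (rest : List Char) (h1 : ¬c = '\'') (h2 : ¬c = '"') (h3 : ¬c = '\\') :
    pvGoB (c :: rest) = c :: pvGoB rest := by
  rw [pvGoB.eq_def]; dsimp only; simp [h1, h2, h3]

theorem pvSkipDouble_quote (rest : List Char) : pvSkipDouble ('"' :: rest) = some rest := by
  rw [pvSkipDouble.eq_def]; simp

theorem pvSkipDouble_other (c : Char) (rest : List Char)
    (hA : ¬(c == '\\') = true) (hB : ¬(c == '"') = true) :
    pvSkipDouble (c :: rest) = pvSkipDouble rest := by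
  rw [pvSkipDouble.eq_def]; simp [hA, hB]

-- inside single quotes A drops chars until the closing quote
theorem pvGoA_single : ∀ (l res : List Char),
    pvGoA l res true false false =
      (match pvSkipSingle l with
       | none => res
       | some rest' => pvGoA rest' (res ++ ['\'']) false false false) := by
  intro l
  induction l with
  | nil => intro res; simp [pvGoA, pvSkipSingle]
  | cons c t ih =>
    intro res
    by_cases hc : c = '\''
    · subst hc; simp [pvGoA, pvSkipSingle]
    · simp only [pvGoA, pvSkipSingle]
      have : (c == '\'') = false := by simp [hc]
      simp [this, ih]

-- inside double quotes A drops chars (backslash consuming one) until the closing quote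
theorem pvGoA_double : ∀ (l res : List Char),
    pvGoA l res false true false =
      (match pvSkipDouble l with
       | none => res
       | some rest' => pvGoA rest' (res ++ ['"']) false false false) := by
  intro l
  induction l using pvSkipDouble.induct with
  | case1 => intro res; simp [pvGoA, pvSkipDouble]
  | case2 c hA =>
    intro res
    have hc : c = '\\' := by simpa using hA
    subst hc; simp [pvGoA, pvSkipDouble]
  | case3 c hA c' rest ih =>
    intro res
    have hc : c = '\\' := by simpa using hA
    subst hc; simp [pvGoA, pvSkipDouble, ih]
  | case4 c rest hA hB =>
    intro res
    have hc : c = '"' := by simpa using hB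
    subst hc
    rw [pvSkipDouble_quote]
    simp [pvGoA]
  | case5 c rest hA hB ih =>
    intro res
    have hl : pvGoA (c :: rest) res false true false = pvGoA rest res false true false := by
      simp [pvGoA, hA, hB]
    rw [hl, ih res, pvSkipDouble_other c rest hA hB]

-- main invariant: unquoted, A's machine produces res ++ B's output
theorem pvGoA_eq_goB : ∀ (l res : List Char),
    pvGoA l res false false false = res ++ pvGoB l := by
  intro l
  induction l using pvGoB.induct with
  | case1 => intro res; simp [pvGoA, pvGoB_nil]
  | case2 rest h =>
    intro res; rw [pvGoB_sq_none rest h]; simp [pvGoA, pvGoA_single, h]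
  | case3 rest rest' h ih =>
    intro res; rw [pvGoB_sq_some rest rest' h]; simp [pvGoA, pvGoA_single, h, ih]
  | case4 rest h hne =>
    intro res; rw [pvGoB_dq_none rest h]; simp [pvGoA, pvGoA_double, h]
  | case5 rest rest' h hne ih =>
    intro res; rw [pvGoB_dq_some rest rest' h]; simp [pvGoA, pvGoA_double, h, ih]
  | case6 h1 h2 =>
    intro res; rw [pvGoB_bs_nil]; simp [pvGoA]
  | case7 c rest h1 h2 ih =>
    intro res; rw [pvGoB_bs_cons]; simp [pvGoA, ih]
  | case8 c rest h1 h2 h3 ih =>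
    intro res; rw [pvGoB_other c rest h1 h2 h3]; simp [pvGoA, h1, h2, h3, ih]

-- ===== VERDICT (by name: the statement is the Claim_ definition above) =====
theorem extract_unquoted_keep_delimiters_py_spec : Claim_equal_extract_unquoted_keep_delimiters_py := by
  intro command _
  unfold Spec_extract_unquoted_keep_delimiters_py extract_unquoted_keep_delimiters_py extract_unquoted_keep_delimiters_py_alt
  rw [pvGoA_eq_goB]
  simp
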